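-- pv_equiv track=rewrite | github.com/TurkuNLP/Turku-neural-parser-pipeline | tnparser/diaparser_mod.py | read_conllu
-- ===== SOURCE A (Python) =====
-- def read_conllu(txt):
--     sent=[]
--     comment=[]
--     for line in txt.split("\n"):
--         line=line.strip()
--         if not line: # new sentence
--             if sent:
--                 yield comment,sent
--             comment=[]
--             sent=[]
--         elif line.startswith("#"):
--             comment.append(line)
--         else: #normal line
--             cols=line.split("\t")
--             sent.append(cols)
--     else:
--         if sent:
--             yield comment, sent
-- ===== SOURCE B (Python) =====
-- def read_conllu(txt):
--     lines = [l.strip() for l in txt.split("\n")]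
--     n = len(lines)
--     i = 0
--     while i < n:
--         if lines[i] == "":
--             i += 1
--             continue
--         j = i
--         while j < n and lines[j] != "":
--             j += 1
--         block = lines[i:j]
--         comments = [l for l in block if l.startswith("#")]
--         rows = [l.split("\t") for l in block if not l.startswith("#")]
--         if rows:
--             yield comments, rows
--         i = j
-- ===== Notes on version B (the rewrite author's own statement) =====
-- stated objective: alternative
-- what changed: Replaced A's per-line state machine (mutable comment/sent accumulators flushed on blank lines) by a two-phase segment-then-classify pass: cut the stripped lines into blank-separated blocks, then split each block into comments and token rows, keeping blocks with at least one token row.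
import Mathlib
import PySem

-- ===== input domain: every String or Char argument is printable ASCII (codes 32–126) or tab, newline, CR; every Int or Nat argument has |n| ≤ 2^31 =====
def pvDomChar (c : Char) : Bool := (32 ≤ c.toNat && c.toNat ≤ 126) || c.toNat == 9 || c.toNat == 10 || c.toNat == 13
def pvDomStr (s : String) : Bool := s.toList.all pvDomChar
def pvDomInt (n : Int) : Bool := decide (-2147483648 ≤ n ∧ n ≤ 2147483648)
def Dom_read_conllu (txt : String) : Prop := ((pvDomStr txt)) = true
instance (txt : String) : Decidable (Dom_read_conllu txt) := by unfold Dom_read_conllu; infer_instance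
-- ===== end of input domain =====

-- B replaces A's per-line accumulator state machine by blank-separated block segmentation followed by per-block classification (alternative decomposition, same cost).

-- s.split(sep) for a nonempty sep (both ports call it with "\n" / "\t"); exact via PySem.Chars.splitOn
def pvSplit (s sep : String) : List String :=
  (PySem.Chars.splitOn s.toList sep.toList).map String.ofList

-- ===== PORT A =====
-- state: (collected output, comment, sent); one step per line, exactly A's branches
def pvStepA (st : List (List String × List (List String)) × List String × List (List String))
    (line : String) : List (List String × List (List String)) × List String × List (List String) :=
  let line := PySem.Str.strip line
  if line = "" then
    (if st.2.2 ≠ [] then st.1 ++ [(st.2.1, st.2.2)] else st.1, [], [])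
  else if PySem.Str.startswith line "#" then
    (st.1, st.2.1 ++ [line], st.2.2)
  else
    (st.1, st.2.1, st.2.2 ++ [pvSplit line "\t"])

def read_conllu (txt : String) : List (List String × List (List String)) :=
  let st := (pvSplit txt "\n").foldl pvStepA ([], [], [])
  if st.2.2 ≠ [] then st.1 ++ [(st.2.1, st.2.2)] else st.1

-- ===== PORT B =====
-- phase one: cut into maximal blocks of non-blank lines
def pvBlocks : List String → List (List String)
  | [] => []
  | l :: ls =>
    if l = "" then pvBlocks ls
    else (l :: ls.takeWhile (fun x => decide (x ≠ ""))) ::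
         pvBlocks (ls.dropWhile (fun x => decide (x ≠ "")))
termination_by ls => ls.length
decreasing_by
  · simp
  · exact lt_of_le_of_lt (List.length_dropWhile_le (fun x => decide (x ≠ "")) ls) (by simp)

-- phase two: classify one block into (comments, token rows); drop it if it has no token rows
def pvClassify (b : List String) : Option (List String × List (List String)) :=
  let comments := b.filter (fun l => PySem.Str.startswith l "#")
  let rows := (b.filter (fun l => !PySem.Str.startswith l "#")).map (fun l => pvSplit l "\t")
  if rows ≠ [] then some (comments, rows) else none

def read_conllu_alt (txt : String) : List (List String × List (List String)) :=
  let lines := (pvSplit txt "\n").map PySem.Str.strip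
  (pvBlocks lines).filterMap pvClassify

-- ===== PRECONDITION & SPEC =====
def Spec_read_conllu (txt : String) (out : List (List String × List (List String))) : Prop := out = read_conllu_alt txt
instance (txt : String) (out : List (List String × List (List String))) : Decidable (Spec_read_conllu txt out) := by unfold Spec_read_conllu; infer_instance

-- ===== CLAIM (what is proved, stated in full; the proofs are below) =====
def Claim_equal_read_conllu : Prop := ∀ (txt : String), Dom_read_conllu txt → Spec_read_conllu txt (read_conllu txt)

-- ===== LEMMAS AND PROOFS =====

-- A's step on an already-stripped line
def pvStepS (st : List (List String × List (List String)) × List String × List (List String))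
    (line : String) : List (List String × List (List String)) × List String × List (List String) :=
  if line = "" then
    (if st.2.2 ≠ [] then st.1 ++ [(st.2.1, st.2.2)] else st.1, [], [])
  else if PySem.Str.startswith line "#" then
    (st.1, st.2.1 ++ [line], st.2.2)
  else
    (st.1, st.2.1, st.2.2 ++ [pvSplit line "\t"])

lemma foldl_stepA (ls : List String) (st : List (List String × List (List String)) × List String × List (List String)) :
    ls.foldl pvStepA st = (ls.map PySem.Str.strip).foldl pvStepS st := by
  rw [List.foldl_map]
  rfl

-- a block of non-blank lines just accumulates comments and token rows
lemma foldl_block (bl : List String) (h : ∀ x ∈ bl, x ≠ "")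
    (out : List (List String × List (List String))) (c : List String) (s : List (List String)) :
    bl.foldl pvStepS (out, c, s) =
      (out, c ++ bl.filter (fun l => PySem.Str.startswith l "#"),
        s ++ (bl.filter (fun l => !PySem.Str.startswith l "#")).map (fun l => pvSplit l "\t")) := by
  induction bl generalizing c s with
  | nil => simp
  | cons x xs ih =>
    have hx : x ≠ "" := h x (by simp)
    have hxs : ∀ y ∈ xs, y ≠ "" := fun y hy => h y (by simp [hy])
    by_cases hc : PySem.Str.startswith x "#" = true
    · have hc' : PySem.Chars.startswith x.toList ['#'] = true := by simpa using hc
      rw [List.foldl_cons, show pvStepS (out, c, s) x = (out, c ++ [x], s) by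
        simp [pvStepS, hx, hc'], ih hxs]
      simp [hc']
    · have hc' : PySem.Chars.startswith x.toList ['#'] = false := by simpa using hc
      rw [List.foldl_cons, show pvStepS (out, c, s) x = (out, c, s ++ [pvSplit x "\t"]) by
        simp [pvStepS, hx, hc'], ih hxs]
      simp [hc']

def pvFinish (st : List (List String × List (List String)) × List String × List (List String)) :
    List (List String × List (List String)) :=
  if st.2.2 ≠ [] then st.1 ++ [(st.2.1, st.2.2)] else st.1

-- the main loop invariant: finishing A's fold from a fresh state appends B's block decomposition
lemma main_lemma (ls : List String) (out : List (List String × List (List String))) :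
    pvFinish (ls.foldl pvStepS (out, [], [])) = out ++ (pvBlocks ls).filterMap pvClassify := by
  induction ls using pvBlocks.induct generalizing out with
  | case1 => simp [pvFinish, pvBlocks]
  | case2 ls ih =>
    have hstep : pvStepS (out, [], []) "" = (out, [], []) := by simp [pvStepS]
    rw [List.foldl_cons, hstep, ih out, pvBlocks, if_pos rfl]
  | case3 l ls hl ih =>
    have hsplit : l :: ls = (l :: ls.takeWhile (fun x => decide (x ≠ ""))) ++
        ls.dropWhile (fun x => decide (x ≠ "")) := by
      rw [List.cons_append, List.takeWhile_append_dropWhile]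
    set t := ls.takeWhile (fun x => decide (x ≠ "")) with ht
    set r := ls.dropWhile (fun x => decide (x ≠ "")) with hr
    have hblock : ∀ x ∈ (l :: t), x ≠ "" := by
      intro x hx
      rcases List.mem_cons.mp hx with h | h
      · simpa [h] using hl
      · have := List.mem_takeWhile_imp (by rw [ht] at h; exact h)
        simpa using this
    set cB := (l :: t).filter (fun l => PySem.Str.startswith l "#") with hcB
    set sB := ((l :: t).filter (fun l => !PySem.Str.startswith l "#")).map (fun l => pvSplit l "\t") with hsB
    have hb : (l :: t).foldl pvStepS (out, [], []) = (out, cB, sB) := by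
      simpa using foldl_block _ hblock out [] []
    have hcls : pvClassify (l :: t) = if sB ≠ [] then some (cB, sB) else none := rfl
    have hfold : (l :: ls).foldl pvStepS (out, [], []) = r.foldl pvStepS (out, cB, sB) := by
      conv_lhs => rw [hsplit]
      rw [List.foldl_append, hb]
    have hBlocks : pvBlocks (l :: ls) = (l :: t) :: pvBlocks r := by
      rw [pvBlocks, if_neg hl]
    rcases hrr : r with _ | ⟨r0, r'⟩
    · -- no trailing blank: finishing the fold flushes the last block
      rw [hfold, hrr, List.foldl_nil, hBlocks, hrr, List.filterMap_cons, hcls]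
      by_cases h : sB = [] <;> simp [pvFinish, pvBlocks, h]
    · -- r starts with a blank line, which flushes the block; then the IH applies to the rest
      have hr0 : r0 = "" := by
        have h0 := List.head?_dropWhile_not (p := fun x => decide (x ≠ "")) (l := ls)
        rw [← hr, hrr] at h0
        simpa using h0
      subst hr0
      have hblank : ∀ (xs : List String), pvBlocks ("" :: xs) = pvBlocks xs := fun xs => by
        rw [pvBlocks, if_pos rfl]
      have hnoop : ∀ (o : List (List String × List (List String))),
          pvStepS (o, [], []) "" = (o, [], []) := fun o => by simp [pvStepS]
      have hflush : pvStepS (out, cB, sB) "" =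
          (out ++ (if sB ≠ [] then [(cB, sB)] else []), [], []) := by
        by_cases h : sB = [] <;> simp [pvStepS, h]
      have hsteprest : r.foldl pvStepS (out, cB, sB) =
          r'.foldl pvStepS (out ++ (if sB ≠ [] then [(cB, sB)] else []), [], []) := by
        rw [hrr, List.foldl_cons, hflush]
      have ih' : pvFinish (r'.foldl pvStepS
            (out ++ (if sB ≠ [] then [(cB, sB)] else []), [], [])) =
          (out ++ (if sB ≠ [] then [(cB, sB)] else [])) ++
            (pvBlocks r').filterMap pvClassify := by
        have h1 := ih (out := out ++ (if sB ≠ [] then [(cB, sB)] else []))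
        rw [hrr, List.foldl_cons, hnoop, hblank] at h1
        exact h1
      rw [hfold, hsteprest, ih', hBlocks, hrr, hblank, List.filterMap_cons, hcls]
      by_cases h : sB = [] <;> simp [h, List.append_assoc]

-- ===== VERDICT (by name: the statement is the Claim_ definition above) =====
theorem read_conllu_spec : Claim_equal_read_conllu := by
  intro txt _
  unfold Spec_read_conllu read_conllu read_conllu_alt
  rw [foldl_stepA]
  exact main_lemma _ []
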